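-- pv_equiv track=rewrite | github.com/nicolay-r/SemEval2024-Task3 | src/service_codalab.py | normalize_utterance
-- ===== SOURCE A (Python) =====
-- import string
--
-- def normalize_utterance(text):
--     """ An attempt to perform utterance text normalization, similar to the ECAC-2024 competitions format.
--     """
--
--     text = text.replace("...", "[CDOT]")
--
--     for sign in string.punctuation:
--         if sign in "`'[]":
--             continue
--         text = text.replace(sign, " {} ".format(sign))
--
--     text = text.replace("[CDOT]", "...")
--
--     return " ".join(text.split())
-- ===== SOURCE B (Python) =====
-- import string
--
-- # Single-pass translation table instead of ~30 full-string replace scans.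
-- _TABLE = str.maketrans({c: " {} ".format(c) for c in string.punctuation if c not in "`'[]"})
--
-- def normalize_utterance(text):
--     text = text.replace("...", "[CDOT]")
--     text = text.translate(_TABLE)
--     text = text.replace("[CDOT]", "...")
--     return " ".join(text.split())
-- ===== Notes on version B (the rewrite author's own statement) =====
-- stated objective: faster
-- what changed: Replaced the loop of ~28 full-string str.replace scans (one per punctuation symbol) by a single str.translate pass over a precomputed translation table.
import Mathlib
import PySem

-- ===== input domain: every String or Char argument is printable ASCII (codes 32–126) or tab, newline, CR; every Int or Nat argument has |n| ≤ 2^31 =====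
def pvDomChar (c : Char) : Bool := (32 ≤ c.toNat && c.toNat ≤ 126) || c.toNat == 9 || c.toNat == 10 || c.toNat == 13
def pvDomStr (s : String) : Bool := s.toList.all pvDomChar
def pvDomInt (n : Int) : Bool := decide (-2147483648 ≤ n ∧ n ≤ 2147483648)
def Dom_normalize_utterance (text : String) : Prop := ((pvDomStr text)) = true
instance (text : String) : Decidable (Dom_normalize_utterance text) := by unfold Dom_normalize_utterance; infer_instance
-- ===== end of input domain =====

-- B replaces the per-punctuation-symbol loop of str.replace scans by one translation-table pass
-- over the characters (one scan instead of ~30; timing at tested sizes was too fast to resolve).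

-- ===== PORT A =====
-- string.punctuation
def pvPunct : List Char := "!\"#$%&'()*+,-./:;<=>?@[\\]^_`{|}~".toList

def normalize_utterance (text : String) : String :=
  let t1 := PySem.Chars.replace text.toList "...".toList "[CDOT]".toList
  let t2 := pvPunct.foldl (fun t sign =>
      if PySem.Chars.isIn [sign] "`'[]".toList then t
      else PySem.Chars.replace t [sign] [' ', sign, ' ']) t1
  let t3 := PySem.Chars.replace t2 "[CDOT]".toList "...".toList
  String.ofList (PySem.Chars.join " ".toList (PySem.Chars.split₀ t3))

-- ===== PORT B =====
-- the translation table's domain: string.punctuation minus "`'[]"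
def pvKeepPunct : List Char := "!\"#$%&()*+,-./:;<=>?@\\^_{|}~".toList

-- one table entry: what text.translate(_TABLE) emits for a character
def pvExpand (c : Char) : List Char := if c ∈ pvKeepPunct then [' ', c, ' '] else [c]

def normalize_utterance_alt (text : String) : String :=
  let t1 := PySem.Chars.replace text.toList "...".toList "[CDOT]".toList
  let t2 := t1.flatMap pvExpand
  let t3 := PySem.Chars.replace t2 "[CDOT]".toList "...".toList
  String.ofList (PySem.Chars.join " ".toList (PySem.Chars.split₀ t3))

-- ===== PRECONDITION & SPEC =====
def Spec_normalize_utterance (text : String) (out : String) : Prop :=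
  out = normalize_utterance_alt text
instance (text : String) (out : String) : Decidable (Spec_normalize_utterance text out) := by
  unfold Spec_normalize_utterance; infer_instance

-- ===== CLAIM =====
def Claim_equal_normalize_utterance : Prop :=
  ∀ (text : String), Dom_normalize_utterance text →
    Spec_normalize_utterance text (normalize_utterance text)

-- ===== LEMMAS AND PROOFS =====

-- replace.go with a single-character pattern, enough fuel: per-character substitution
lemma pv_go_single (c : Char) (new : List Char) :
    ∀ (l acc : List Char) (fuel : Nat), l.length ≤ fuel →
      PySem.Chars.replace.go [c] new fuel l acc =
        acc.reverse ++ l.flatMap (fun x => if x = c then new else [x]) := by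
  intro l
  induction l with
  | nil => intro acc fuel h; cases fuel <;> simp [PySem.Chars.replace.go]
  | cons x t ih =>
    intro acc fuel h
    cases fuel with
    | zero => simp at h
    | succ f =>
      simp only [PySem.Chars.replace.go]
      by_cases hx : x = c
      · subst hx
        simp only [List.isPrefixOf, beq_self_eq_true, Bool.true_and, if_pos,
          List.length_singleton, List.drop_succ_cons, List.drop_zero]
        rw [ih (new.reverse ++ acc) f (by simpa using Nat.le_of_succ_le_succ h)]
        simp
      · have : ([c].isPrefixOf (x :: t)) = false := by
          simp [List.isPrefixOf]; exact fun hh => (hx hh.symm).elim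
        rw [this]
        simp only [Bool.false_eq_true, if_false]
        rw [ih (x :: acc) f (Nat.le_of_succ_le_succ h)]
        simp [hx]

-- Chars.replace with a single-character old string IS a per-character flatMap
lemma pv_replace_single (c : Char) (new s : List Char) :
    PySem.Chars.replace s [c] new = s.flatMap (fun x => if x = c then new else [x]) := by
  simp [PySem.Chars.replace, pv_go_single c new s [] s.length le_rfl]

-- folding the single-character " c " replacements over distinct, non-space signs
-- is the single-pass per-character expansion
lemma pv_foldl_replace (ss : List Char) (hnd : ss.Nodup) (hsp : ' ' ∉ ss) :
    ∀ s : List Char,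
      ss.foldl (fun t c => PySem.Chars.replace t [c] [' ', c, ' ']) s =
        s.flatMap (fun x => if x ∈ ss then [' ', x, ' '] else [x]) := by
  induction ss with
  | nil => intro s; simp
  | cons c ss ih =>
    intro s
    simp only [List.foldl_cons]
    rw [pv_replace_single,
      ih (List.Nodup.of_cons hnd) (fun h => hsp (List.mem_cons_of_mem _ h)),
      List.flatMap_assoc]
    apply List.flatMap_congr
    intro x _
    by_cases hx : x = c
    · subst hx
      have hc : x ∉ ss := (List.nodup_cons.mp hnd).1
      have hs : ' ' ∉ ss := fun h => hsp (List.mem_cons_of_mem _ h)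
      simp [hc, hs]
    · simp [hx, List.mem_cons]

-- the skip-branch loop of A is the loop over the filtered sign list
lemma pv_foldl_skip (skip : Char → Bool) (g : List Char → Char → List Char) (l : List Char) :
    ∀ s, l.foldl (fun t c => if skip c then t else g t c) s =
      (l.filter (fun c => !skip c)).foldl g s := by
  induction l with
  | nil => intro s; simp
  | cons c t ih =>
    intro s
    by_cases hc : skip c = true <;> simp [hc, ih]

lemma pv_filter_punct :
    pvPunct.filter (fun c => !PySem.Chars.isIn [c] "`'[]".toList) = pvKeepPunct := by
  decide

-- ===== VERDICT =====
theorem normalize_utterance_spec : Claim_equal_normalize_utterance := by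
  unfold Claim_equal_normalize_utterance
  intro text _
  unfold Spec_normalize_utterance normalize_utterance normalize_utterance_alt
  simp only
  rw [pv_foldl_skip, pv_filter_punct,
    pv_foldl_replace pvKeepPunct (by decide) (by decide)]
  rfl
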